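-- pv_equiv track=rewrite | github.com/jonas-mika/hoest21 | bingo/bingo.py | check_simple_bingo
-- ===== SOURCE A (Python) =====
-- def check_simple_bingo(field):
--     # check cols
--     for i in range(5):
--         c = 0
--         for j in range(5):
--             if field[i][j] == '*':
--                 c += 1
--         if c == 5:
--             return True
--
--     # check cols
--     for j in range(5):
--         c = 0
--         for i in range(5):
--             if field[i][j] == '*':
--                 c += 1
--         if c == 5:
--             return True
--
--     # check diagonals
--     c = 0
--     for i in range(5):
--         if field[i][i] == '*':
--             c += 1
--     if c == 5:
--         return True
--
--     c = 0
--     for i in range(5):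
--         if field[i][4-i] == '*':
--             c += 1
--     if c == 5:
--         return True
--
--     return False
-- ===== SOURCE B (Python) =====
-- def check_simple_bingo(field):
--     # Pack the 5x5 grid into a 25-bit star bitmask, then test it against the
--     # 12 precomputed winning-line masks with bitwise AND.
--     mask = 0
--     for i in range(5):
--         for j in range(5):
--             if field[i][j] == '*':
--                 mask |= 1 << (5 * i + j)
--     wins = [0x1F << (5 * i) for i in range(5)]
--     wins += [0x108421 << j for j in range(5)]
--     wins += [0x1041041, 0x111110]
--     for w in wins:
--         if mask & w == w:
--             return True
--     return False
-- ===== Notes on version B (the rewrite author's own statement) =====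
-- stated objective: alternative
-- what changed: Replaces A's four per-line counting loop blocks by a bitboard: the grid is packed once into a 25-bit star bitmask and bingo is decided by AND-ing it against the 12 precomputed winning-line masks.
-- outside the precondition, e.g. on check_simple_bingo([['*', '*', '*', '*', '*']]): A returns True, B raises IndexError
import Mathlib
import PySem

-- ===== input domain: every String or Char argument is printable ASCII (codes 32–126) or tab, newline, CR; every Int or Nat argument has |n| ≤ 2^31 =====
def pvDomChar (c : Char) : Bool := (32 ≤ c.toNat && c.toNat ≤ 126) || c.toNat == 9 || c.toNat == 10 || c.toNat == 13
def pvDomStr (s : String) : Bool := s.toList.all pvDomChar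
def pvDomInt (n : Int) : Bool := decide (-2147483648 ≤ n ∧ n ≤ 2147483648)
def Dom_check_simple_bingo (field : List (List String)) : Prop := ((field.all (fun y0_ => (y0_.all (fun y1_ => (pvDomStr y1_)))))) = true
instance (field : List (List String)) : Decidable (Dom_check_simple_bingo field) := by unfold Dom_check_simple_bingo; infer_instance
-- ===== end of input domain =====

-- B replaces A's four per-line counting loop blocks by a bitboard: the grid is packed
-- once into a 25-bit star bitmask and tested against 12 precomputed line masks
-- (objective: alternative).

-- ===== PORT A =====
-- field[i][j]; default "" only feeds inputs outside Pre_ (where Python raises IndexError)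
def pvCell (field : List (List String)) (i j : Int) : String :=
  PySem.List.pyGetD (PySem.List.pyGetD field i []) j ""

def pvCountRow (field : List (List String)) (i : Int) : Int :=
  (PySem.List.pyRange 0 5 1).foldl (fun c j => if pvCell field i j = "*" then c + 1 else c) 0

def pvCountCol (field : List (List String)) (j : Int) : Int :=
  (PySem.List.pyRange 0 5 1).foldl (fun c i => if pvCell field i j = "*" then c + 1 else c) 0

def pvRowsLoop (field : List (List String)) : List Int → Bool
  | [] => false
  | i :: rest => if pvCountRow field i = 5 then true else pvRowsLoop field rest

def pvColsLoop (field : List (List String)) : List Int → Bool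
  | [] => false
  | j :: rest => if pvCountCol field j = 5 then true else pvColsLoop field rest

def pvCountDiag1 (field : List (List String)) : Int :=
  (PySem.List.pyRange 0 5 1).foldl (fun c i => if pvCell field i i = "*" then c + 1 else c) 0

def pvCountDiag2 (field : List (List String)) : Int :=
  (PySem.List.pyRange 0 5 1).foldl (fun c i => if pvCell field i (4 - i) = "*" then c + 1 else c) 0

def check_simple_bingo (field : List (List String)) : Bool :=
  if pvRowsLoop field (PySem.List.pyRange 0 5 1) then true
  else if pvColsLoop field (PySem.List.pyRange 0 5 1) then true
  else if pvCountDiag1 field = 5 then true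
  else if pvCountDiag2 field = 5 then true
  else false

-- ===== PORT B =====
-- shift amounts are nonnegative (i, j ∈ range(5)), so .toNat is exact here
def pvMask (field : List (List String)) : Nat :=
  (PySem.List.pyRange 0 5 1).foldl (fun m i =>
    (PySem.List.pyRange 0 5 1).foldl (fun m j =>
      if pvCell field i j = "*" then m ||| (1 <<< (5 * i + j).toNat) else m) m) 0

def pvWins : List Nat :=
  ((PySem.List.pyRange 0 5 1).map (fun i => 0x1F <<< (5 * i).toNat) ++
   (PySem.List.pyRange 0 5 1).map (fun j => 0x108421 <<< j.toNat)) ++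
  [0x1041041, 0x111110]

def pvWinsLoop (mask : Nat) : List Nat → Bool
  | [] => false
  | w :: rest => if mask &&& w = w then true else pvWinsLoop mask rest

def check_simple_bingo_alt (field : List (List String)) : Bool :=
  pvWinsLoop (pvMask field) pvWins

-- ===== PRECONDITION & SPEC =====
-- Pre_ excludes malformed grids (fewer than 5 rows, or a short row among the first
-- five), where Python raises IndexError on most inputs; A does return on a few of
-- those (e.g. a single all-star row of length 5, returned before the rest is
-- touched), where B raises — see the cite.
def Pre_check_simple_bingo (field : List (List String)) : Prop :=
  5 ≤ field.length ∧ ∀ row ∈ field.take 5, 5 ≤ row.length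
instance (field : List (List String)) : Decidable (Pre_check_simple_bingo field) := by
  unfold Pre_check_simple_bingo; infer_instance

def pvWitness_check_simple_bingo : List (List String) :=
  [["*","x","x","x","x"], ["x","*","x","x","x"], ["x","x","*","x","x"],
   ["x","x","x","*","x"], ["x","x","x","x","*"]]

def Spec_check_simple_bingo (field : List (List String)) (out : Bool) : Prop := out = check_simple_bingo_alt field
instance (field : List (List String)) (out : Bool) : Decidable (Spec_check_simple_bingo field out) := by unfold Spec_check_simple_bingo; infer_instance

-- ===== CLAIM (what is proved, stated in full; the proofs are below) =====
def Claim_equal_check_simple_bingo : Prop := ∀ (field : List (List String)), Dom_check_simple_bingo field → Pre_check_simple_bingo field → Spec_check_simple_bingo field (check_simple_bingo field)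

-- ===== LEMMAS AND PROOFS =====

lemma pvRange5 : PySem.List.pyRange 0 5 1 = [0, 1, 2, 3, 4] := by decide

-- a 5-step counting fold hits 5 exactly when all five tests hold
lemma pvCount5 (t : Int → Prop) [DecidablePred t] :
    (List.foldl (fun (c : Int) j => if t j then c + 1 else c) 0 [0, 1, 2, 3, 4] = 5)
      ↔ (t 0 ∧ t 1 ∧ t 2 ∧ t 3 ∧ t 4) := by
  by_cases h0 : t 0 <;> by_cases h1 : t 1 <;> by_cases h2 : t 2 <;>
    by_cases h3 : t 3 <;> by_cases h4 : t 4 <;>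
      simp [List.foldl, h0, h1, h2, h3, h4]

lemma pvAnd_eq_self_iff (m w : Nat) :
    (m &&& w = w) ↔ ∀ k, w.testBit k = true → m.testBit k = true := by
  constructor
  · intro h k hk
    have := congrArg (fun x => Nat.testBit x k) h
    simp only [Nat.testBit_and, hk, Bool.and_true] at this
    exact this
  · intro h
    apply Nat.eq_of_testBit_eq
    intro k
    rw [Nat.testBit_and]
    by_cases hk : w.testBit k = true
    · simp [hk, h k hk]
    · simp [Bool.eq_false_iff.mpr hk]


lemma pvFoldl_testBit (F : Nat → Int → Nat) (h : Int → Nat → Bool)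
    (H : ∀ m j k, (F m j).testBit k = (m.testBit k || h j k)) :
    ∀ (l : List Int) (m : Nat) (k : Nat),
      ((l.foldl F m).testBit k) = (m.testBit k || l.any (fun j => h j k)) := by
  intro l
  induction l with
  | nil => simp
  | cons j rest ih =>
    intro m k
    simp [List.foldl, ih, H, Bool.or_assoc]

-- the bit at position k of the packed mask is set iff some cell (i, j) with 5*i+j = k is a star
lemma pvMask_testBit (field : List (List String)) (k : Nat) :
    (pvMask field).testBit k =
      (PySem.List.pyRange 0 5 1).any (fun i =>
        (PySem.List.pyRange 0 5 1).any (fun j =>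
          decide (pvCell field i j = "*") && decide ((5 * i + j).toNat = k))) := by
  unfold pvMask
  rw [pvFoldl_testBit
        (fun m i => (PySem.List.pyRange 0 5 1).foldl
          (fun m j => if pvCell field i j = "*" then m ||| (1 <<< (5 * i + j).toNat) else m) m)
        (fun i k => (PySem.List.pyRange 0 5 1).any (fun j =>
          decide (pvCell field i j = "*") && decide ((5 * i + j).toNat = k)))
        (fun m i k => pvFoldl_testBit _
          (fun j k => decide (pvCell field i j = "*") && decide ((5 * i + j).toNat = k))
          (fun m j k => by
            by_cases h : pvCell field i j = "*" <;> by_cases hp : (5 * i + j).toNat = k <;>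
              simp [h, hp, Nat.testBit_or, Nat.one_shiftLeft])
          _ m k)]
  simp

-- m has all bits of the 5-bit line mask iff each of the five bits is set in m
lemma pvBits5 (m a b c d e : Nat) :
    (m &&& ((1 <<< a) ||| ((1 <<< b) ||| ((1 <<< c) ||| ((1 <<< d) ||| (1 <<< e)))))
       = ((1 <<< a) ||| ((1 <<< b) ||| ((1 <<< c) ||| ((1 <<< d) ||| (1 <<< e)))))) ↔
    (m.testBit a = true ∧ m.testBit b = true ∧ m.testBit c = true ∧ m.testBit d = true ∧ m.testBit e = true) := by
  rw [pvAnd_eq_self_iff]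
  constructor
  · intro h
    refine ⟨h a ?_, h b ?_, h c ?_, h d ?_, h e ?_⟩ <;>
      simp [Nat.testBit_or, Nat.one_shiftLeft, Nat.testBit_two_pow]
  · rintro ⟨h1,h2,h3,h4,h5⟩ k hk
    simp [Nat.testBit_or, Nat.one_shiftLeft, Nat.testBit_two_pow] at hk
    rcases hk with h|h|h|h|h <;> subst h <;> assumption

lemma pvIfOr (p : Prop) [Decidable p] (b : Bool) : (if p then true else b) = (decide p || b) := by
  by_cases h : p <;> simp [h]

lemma pvWinsEval : pvWins = [31, 992, 31744, 1015808, 32505856, 1082401, 2164802,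
    4329604, 8659208, 17318416, 17043521, 1118480] := by decide

-- ===== VERDICT (by name: the statement is the Claim_ definition above) =====

theorem check_simple_bingo_spec : Claim_equal_check_simple_bingo := by
  intro field _ _
  show check_simple_bingo field = check_simple_bingo_alt field
  have w0 : (pvMask field &&& 31 = 31) ↔
      (pvCell field 0 0 = "*" ∧ pvCell field 0 1 = "*" ∧ pvCell field 0 2 = "*" ∧ pvCell field 0 3 = "*" ∧ pvCell field 0 4 = "*") := by
    rw [show (31:Nat) = (1 <<< 0) ||| ((1 <<< 1) ||| ((1 <<< 2) ||| ((1 <<< 3) ||| (1 <<< 4)))) by decide, pvBits5]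
    simp only [pvMask_testBit, pvRange5, List.any_cons, List.any_nil]
    simp
  have w1 : (pvMask field &&& 992 = 992) ↔
      (pvCell field 1 0 = "*" ∧ pvCell field 1 1 = "*" ∧ pvCell field 1 2 = "*" ∧ pvCell field 1 3 = "*" ∧ pvCell field 1 4 = "*") := by
    rw [show (992:Nat) = (1 <<< 5) ||| ((1 <<< 6) ||| ((1 <<< 7) ||| ((1 <<< 8) ||| (1 <<< 9)))) by decide, pvBits5]
    simp only [pvMask_testBit, pvRange5, List.any_cons, List.any_nil]
    simp
  have w2 : (pvMask field &&& 31744 = 31744) ↔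
      (pvCell field 2 0 = "*" ∧ pvCell field 2 1 = "*" ∧ pvCell field 2 2 = "*" ∧ pvCell field 2 3 = "*" ∧ pvCell field 2 4 = "*") := by
    rw [show (31744:Nat) = (1 <<< 10) ||| ((1 <<< 11) ||| ((1 <<< 12) ||| ((1 <<< 13) ||| (1 <<< 14)))) by decide, pvBits5]
    simp only [pvMask_testBit, pvRange5, List.any_cons, List.any_nil]
    simp
  have w3 : (pvMask field &&& 1015808 = 1015808) ↔
      (pvCell field 3 0 = "*" ∧ pvCell field 3 1 = "*" ∧ pvCell field 3 2 = "*" ∧ pvCell field 3 3 = "*" ∧ pvCell field 3 4 = "*") := by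
    rw [show (1015808:Nat) = (1 <<< 15) ||| ((1 <<< 16) ||| ((1 <<< 17) ||| ((1 <<< 18) ||| (1 <<< 19)))) by decide, pvBits5]
    simp only [pvMask_testBit, pvRange5, List.any_cons, List.any_nil]
    simp
  have w4 : (pvMask field &&& 32505856 = 32505856) ↔
      (pvCell field 4 0 = "*" ∧ pvCell field 4 1 = "*" ∧ pvCell field 4 2 = "*" ∧ pvCell field 4 3 = "*" ∧ pvCell field 4 4 = "*") := by
    rw [show (32505856:Nat) = (1 <<< 20) ||| ((1 <<< 21) ||| ((1 <<< 22) ||| ((1 <<< 23) ||| (1 <<< 24)))) by decide, pvBits5]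
    simp only [pvMask_testBit, pvRange5, List.any_cons, List.any_nil]
    simp
  have w5 : (pvMask field &&& 1082401 = 1082401) ↔
      (pvCell field 0 0 = "*" ∧ pvCell field 1 0 = "*" ∧ pvCell field 2 0 = "*" ∧ pvCell field 3 0 = "*" ∧ pvCell field 4 0 = "*") := by
    rw [show (1082401:Nat) = (1 <<< 0) ||| ((1 <<< 5) ||| ((1 <<< 10) ||| ((1 <<< 15) ||| (1 <<< 20)))) by decide, pvBits5]
    simp only [pvMask_testBit, pvRange5, List.any_cons, List.any_nil]
    simp
  have w6 : (pvMask field &&& 2164802 = 2164802) ↔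
      (pvCell field 0 1 = "*" ∧ pvCell field 1 1 = "*" ∧ pvCell field 2 1 = "*" ∧ pvCell field 3 1 = "*" ∧ pvCell field 4 1 = "*") := by
    rw [show (2164802:Nat) = (1 <<< 1) ||| ((1 <<< 6) ||| ((1 <<< 11) ||| ((1 <<< 16) ||| (1 <<< 21)))) by decide, pvBits5]
    simp only [pvMask_testBit, pvRange5, List.any_cons, List.any_nil]
    simp
  have w7 : (pvMask field &&& 4329604 = 4329604) ↔
      (pvCell field 0 2 = "*" ∧ pvCell field 1 2 = "*" ∧ pvCell field 2 2 = "*" ∧ pvCell field 3 2 = "*" ∧ pvCell field 4 2 = "*") := by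
    rw [show (4329604:Nat) = (1 <<< 2) ||| ((1 <<< 7) ||| ((1 <<< 12) ||| ((1 <<< 17) ||| (1 <<< 22)))) by decide, pvBits5]
    simp only [pvMask_testBit, pvRange5, List.any_cons, List.any_nil]
    simp
  have w8 : (pvMask field &&& 8659208 = 8659208) ↔
      (pvCell field 0 3 = "*" ∧ pvCell field 1 3 = "*" ∧ pvCell field 2 3 = "*" ∧ pvCell field 3 3 = "*" ∧ pvCell field 4 3 = "*") := by
    rw [show (8659208:Nat) = (1 <<< 3) ||| ((1 <<< 8) ||| ((1 <<< 13) ||| ((1 <<< 18) ||| (1 <<< 23)))) by decide, pvBits5]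
    simp only [pvMask_testBit, pvRange5, List.any_cons, List.any_nil]
    simp
  have w9 : (pvMask field &&& 17318416 = 17318416) ↔
      (pvCell field 0 4 = "*" ∧ pvCell field 1 4 = "*" ∧ pvCell field 2 4 = "*" ∧ pvCell field 3 4 = "*" ∧ pvCell field 4 4 = "*") := by
    rw [show (17318416:Nat) = (1 <<< 4) ||| ((1 <<< 9) ||| ((1 <<< 14) ||| ((1 <<< 19) ||| (1 <<< 24)))) by decide, pvBits5]
    simp only [pvMask_testBit, pvRange5, List.any_cons, List.any_nil]
    simp
  have w10 : (pvMask field &&& 17043521 = 17043521) ↔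
      (pvCell field 0 0 = "*" ∧ pvCell field 1 1 = "*" ∧ pvCell field 2 2 = "*" ∧ pvCell field 3 3 = "*" ∧ pvCell field 4 4 = "*") := by
    rw [show (17043521:Nat) = (1 <<< 0) ||| ((1 <<< 6) ||| ((1 <<< 12) ||| ((1 <<< 18) ||| (1 <<< 24)))) by decide, pvBits5]
    simp only [pvMask_testBit, pvRange5, List.any_cons, List.any_nil]
    simp
  have w11 : (pvMask field &&& 1118480 = 1118480) ↔
      (pvCell field 0 4 = "*" ∧ pvCell field 1 3 = "*" ∧ pvCell field 2 2 = "*" ∧ pvCell field 3 1 = "*" ∧ pvCell field 4 0 = "*") := by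
    rw [show (1118480:Nat) = (1 <<< 4) ||| ((1 <<< 8) ||| ((1 <<< 12) ||| ((1 <<< 16) ||| (1 <<< 20)))) by decide, pvBits5]
    simp only [pvMask_testBit, pvRange5, List.any_cons, List.any_nil]
    simp
  have r0 : (pvCountRow field 0 = 5) ↔
      (pvCell field 0 0 = "*" ∧ pvCell field 0 1 = "*" ∧ pvCell field 0 2 = "*" ∧ pvCell field 0 3 = "*" ∧ pvCell field 0 4 = "*") := by
    simp only [pvCountRow, pvRange5]
    exact pvCount5 (fun j => pvCell field 0 j = "*")
  have r1 : (pvCountRow field 1 = 5) ↔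
      (pvCell field 1 0 = "*" ∧ pvCell field 1 1 = "*" ∧ pvCell field 1 2 = "*" ∧ pvCell field 1 3 = "*" ∧ pvCell field 1 4 = "*") := by
    simp only [pvCountRow, pvRange5]
    exact pvCount5 (fun j => pvCell field 1 j = "*")
  have r2 : (pvCountRow field 2 = 5) ↔
      (pvCell field 2 0 = "*" ∧ pvCell field 2 1 = "*" ∧ pvCell field 2 2 = "*" ∧ pvCell field 2 3 = "*" ∧ pvCell field 2 4 = "*") := by
    simp only [pvCountRow, pvRange5]
    exact pvCount5 (fun j => pvCell field 2 j = "*")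
  have r3 : (pvCountRow field 3 = 5) ↔
      (pvCell field 3 0 = "*" ∧ pvCell field 3 1 = "*" ∧ pvCell field 3 2 = "*" ∧ pvCell field 3 3 = "*" ∧ pvCell field 3 4 = "*") := by
    simp only [pvCountRow, pvRange5]
    exact pvCount5 (fun j => pvCell field 3 j = "*")
  have r4 : (pvCountRow field 4 = 5) ↔
      (pvCell field 4 0 = "*" ∧ pvCell field 4 1 = "*" ∧ pvCell field 4 2 = "*" ∧ pvCell field 4 3 = "*" ∧ pvCell field 4 4 = "*") := by
    simp only [pvCountRow, pvRange5]
    exact pvCount5 (fun j => pvCell field 4 j = "*")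
  have c0 : (pvCountCol field 0 = 5) ↔
      (pvCell field 0 0 = "*" ∧ pvCell field 1 0 = "*" ∧ pvCell field 2 0 = "*" ∧ pvCell field 3 0 = "*" ∧ pvCell field 4 0 = "*") := by
    simp only [pvCountCol, pvRange5]
    exact pvCount5 (fun i => pvCell field i 0 = "*")
  have c1 : (pvCountCol field 1 = 5) ↔
      (pvCell field 0 1 = "*" ∧ pvCell field 1 1 = "*" ∧ pvCell field 2 1 = "*" ∧ pvCell field 3 1 = "*" ∧ pvCell field 4 1 = "*") := by
    simp only [pvCountCol, pvRange5]
    exact pvCount5 (fun i => pvCell field i 1 = "*")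
  have c2 : (pvCountCol field 2 = 5) ↔
      (pvCell field 0 2 = "*" ∧ pvCell field 1 2 = "*" ∧ pvCell field 2 2 = "*" ∧ pvCell field 3 2 = "*" ∧ pvCell field 4 2 = "*") := by
    simp only [pvCountCol, pvRange5]
    exact pvCount5 (fun i => pvCell field i 2 = "*")
  have c3 : (pvCountCol field 3 = 5) ↔
      (pvCell field 0 3 = "*" ∧ pvCell field 1 3 = "*" ∧ pvCell field 2 3 = "*" ∧ pvCell field 3 3 = "*" ∧ pvCell field 4 3 = "*") := by
    simp only [pvCountCol, pvRange5]
    exact pvCount5 (fun i => pvCell field i 3 = "*")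
  have c4 : (pvCountCol field 4 = 5) ↔
      (pvCell field 0 4 = "*" ∧ pvCell field 1 4 = "*" ∧ pvCell field 2 4 = "*" ∧ pvCell field 3 4 = "*" ∧ pvCell field 4 4 = "*") := by
    simp only [pvCountCol, pvRange5]
    exact pvCount5 (fun i => pvCell field i 4 = "*")
  have d1 : (pvCountDiag1 field = 5) ↔
      (pvCell field 0 0 = "*" ∧ pvCell field 1 1 = "*" ∧ pvCell field 2 2 = "*" ∧ pvCell field 3 3 = "*" ∧ pvCell field 4 4 = "*") := by
    simp only [pvCountDiag1, pvRange5]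
    exact pvCount5 (fun i => pvCell field i i = "*")
  have d2 : (pvCountDiag2 field = 5) ↔
      (pvCell field 0 4 = "*" ∧ pvCell field 1 3 = "*" ∧ pvCell field 2 2 = "*" ∧ pvCell field 3 1 = "*" ∧ pvCell field 4 0 = "*") := by
    simp only [pvCountDiag2, pvRange5]
    have := pvCount5 (fun i => pvCell field i (4 - i) = "*")
    norm_num at this ⊢
    exact this
  simp only [check_simple_bingo, check_simple_bingo_alt, pvRowsLoop, pvColsLoop,
    pvWinsLoop, pvWinsEval, pvRange5]
  simp only [r0, r1, r2, r3, r4, c0, c1, c2, c3, c4, d1, d2,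
    w0, w1, w2, w3, w4, w5, w6, w7, w8, w9, w10, w11]
  simp only [pvIfOr, Bool.decide_eq_true, Bool.or_false, Bool.or_assoc]
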